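-- pv_equiv track=rewrite | github.com/oojore11-blip/eco-bee-implementation | backend/ecoscore.py | select_contextual_recommendation
-- ===== SOURCE A (Python) =====
-- from typing import Dict, List, Tuple, Optional
--
-- def select_contextual_recommendation(templates: List[Dict], items: List[Dict], boundary_key: str) -> Dict:
--     """Select most relevant recommendation based on user's items"""
--     # Analyze user's items to find most relevant recommendations
--     item_types = [item.get('type', '').lower() for item in items]
--     item_categories = [item.get('category', '').lower() for item in items]
--
--     # Simple contextual selection logic
--     if 'food' in item_types or 'meal' in item_types:
--         food_recommendations = [r for r in templates if 'meal' in r['action'] or 'food' in r['action'] or 'meat' in r['action']]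
--         if food_recommendations:
--             return food_recommendations[0]
--
--     if 'clothing' in item_types or 'outfit' in item_types:
--         clothing_recommendations = [r for r in templates if 'clothing' in r['action'] or 'second-hand' in r['action']]
--         if clothing_recommendations:
--             return clothing_recommendations[0]
--
--     if 'transport' in item_types or 'mobility' in item_types:
--         transport_recommendations = [r for r in templates if 'transport' in r['action'] or 'bike' in r['action']]
--         if transport_recommendations:
--             return transport_recommendations[0]
--
--     # Default to first recommendation
--     return templates[0] if templates else {"action": "Explore sustainable alternatives", "impact": "Reduce environmental pressure", "difficulty": "easy"}
-- ===== SOURCE B (Python) =====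
-- # B inverts the traversal: one pass over templates builds, per keyword group, the
-- # first matching template; the fired rules are then looked up in that index.
-- _RULES = [({"food", "meal"}, ("meal", "food", "meat")),
--           ({"clothing", "outfit"}, ("clothing", "second-hand")),
--           ({"transport", "mobility"}, ("transport", "bike"))]
--
-- _DEFAULT = {"action": "Explore sustainable alternatives",
--             "impact": "Reduce environmental pressure",
--             "difficulty": "easy"}
--
-- def select_contextual_recommendation(templates, items, boundary_key):
--     types = {item.get('type', '').lower() for item in items}
--     fired = [bool(triggers & types) for triggers, _ in _RULES]
--     if any(fired):
--         # single pass: remember the first template matching each keyword group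
--         first = [None] * len(_RULES)
--         for r in templates:
--             action = r['action']
--             first = [f if f is not None
--                      else (r if any(k in action for k in kws) else None)
--                      for f, (_, kws) in zip(first, _RULES)]
--         for hit, f in zip(fired, first):
--             if hit and f is not None:
--                 return f
--     return templates[0] if templates else dict(_DEFAULT)
-- ===== Notes on version B (the rewrite author's own statement) =====
-- stated objective: alternative
-- what changed: B inverts the traversal: instead of re-scanning the template list once per fired rule as A's three if-blocks do, it makes a single pass over templates building a per-keyword-group first-match index (a zip-updated list of options), then walks the fired rules and returns the first indexed hit, falling back to templates[0] or the default dict.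
import Mathlib
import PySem

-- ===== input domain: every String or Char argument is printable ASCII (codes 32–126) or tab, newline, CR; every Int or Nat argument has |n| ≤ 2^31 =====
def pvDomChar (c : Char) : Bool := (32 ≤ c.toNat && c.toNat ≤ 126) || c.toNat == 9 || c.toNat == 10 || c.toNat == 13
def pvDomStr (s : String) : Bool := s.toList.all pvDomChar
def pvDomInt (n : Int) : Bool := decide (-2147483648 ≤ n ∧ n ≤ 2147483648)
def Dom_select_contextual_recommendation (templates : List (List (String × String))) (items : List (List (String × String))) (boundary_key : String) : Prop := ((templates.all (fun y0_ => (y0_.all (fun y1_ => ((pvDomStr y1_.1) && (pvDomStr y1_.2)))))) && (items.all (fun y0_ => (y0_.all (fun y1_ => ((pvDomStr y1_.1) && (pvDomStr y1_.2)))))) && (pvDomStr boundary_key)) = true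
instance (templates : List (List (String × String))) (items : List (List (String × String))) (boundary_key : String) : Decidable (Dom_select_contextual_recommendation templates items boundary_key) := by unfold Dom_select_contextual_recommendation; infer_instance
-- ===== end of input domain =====

-- B inverts the traversal: one pass over templates builds a per-keyword-group first-match
-- index, then the fired rules consult it; proved equal to A where A raises no KeyError.

-- ===== PORT A =====
-- default dict returned when templates is empty
def pvDefaultRec : List (String × String) :=
  [("action", "Explore sustainable alternatives"), ("impact", "Reduce environmental pressure"), ("difficulty", "easy")]

-- r['action'] — total form; Pre_ guarantees the key is present whenever it is evaluated
def pvAction (r : List (String × String)) : String := PySem.Dict.getD (PySem.Dict.mk r) "action" ""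

def select_contextual_recommendation (templates : List (List (String × String))) (items : List (List (String × String))) (boundary_key : String) : List (String × String) :=
  let item_types := items.map (fun item => PySem.Str.lower (PySem.Dict.getD (PySem.Dict.mk item) "type" ""))
  let _item_categories := items.map (fun item => PySem.Str.lower (PySem.Dict.getD (PySem.Dict.mk item) "category" ""))
  ((if item_types.contains "food" || item_types.contains "meal" then
      (templates.filter (fun r => PySem.Str.isIn "meal" (pvAction r) || PySem.Str.isIn "food" (pvAction r) || PySem.Str.isIn "meat" (pvAction r))).head?
    else none).getD
  ((if item_types.contains "clothing" || item_types.contains "outfit" then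
      (templates.filter (fun r => PySem.Str.isIn "clothing" (pvAction r) || PySem.Str.isIn "second-hand" (pvAction r))).head?
    else none).getD
  ((if item_types.contains "transport" || item_types.contains "mobility" then
      (templates.filter (fun r => PySem.Str.isIn "transport" (pvAction r) || PySem.Str.isIn "bike" (pvAction r))).head?
    else none).getD
  (templates.headD pvDefaultRec))))

-- ===== PORT B =====
-- the ordered rule table: (trigger types, action keywords)
def pvRules : List (List String × List String) :=
  [(["food", "meal"], ["meal", "food", "meat"]),
   (["clothing", "outfit"], ["clothing", "second-hand"]),
   (["transport", "mobility"], ["transport", "bike"])]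

-- the per-template update of the first-match index (the zip-comprehension in Source B)
def pvUpdate (r : List (String × String)) (first : List (Option (List (String × String)))) : List (Option (List (String × String))) :=
  (first.zip pvRules).map (fun p =>
    match p.1 with
    | some f => some f
    | none => if p.2.2.any (fun k => PySem.Str.isIn k (pvAction r)) then some r else none)

-- 'for hit, f in zip(fired, first): if hit and f is not None: return f'
def pvPick : List (Bool × Option (List (String × String))) → Option (List (String × String))
  | [] => none
  | (hit, f) :: rest =>
    match hit, f with
    | true, some r => some r
    | _, _ => pvPick rest

def select_contextual_recommendation_alt (templates : List (List (String × String))) (items : List (List (String × String))) (boundary_key : String) : List (String × String) :=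
  let types : PySem.Set String := PySem.Set.ofList (items.map (fun item => PySem.Str.lower (PySem.Dict.getD (PySem.Dict.mk item) "type" "")))
  let fired := pvRules.map (fun rule => rule.1.any (fun t => types.contains t))
  if fired.any id then
    let first := templates.foldl (fun first r => pvUpdate r first) (pvRules.map (fun _ => none))
    (pvPick (fired.zip first)).getD (templates.headD pvDefaultRec)
  else templates.headD pvDefaultRec

-- ===== PRECONDITION & SPEC =====
-- Pre_ excludes exactly the inputs where both Pythons raise KeyError: if some item's
-- lowered 'type' is one of the six trigger words, every template must carry 'action'.
def Pre_select_contextual_recommendation (templates : List (List (String × String))) (items : List (List (String × String))) (boundary_key : String) : Prop :=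
  ((items.map (fun item => PySem.Str.lower (PySem.Dict.getD (PySem.Dict.mk item) "type" ""))).any
     (fun t => ["food", "meal", "clothing", "outfit", "transport", "mobility"].contains t)) = true →
  templates.all (fun r => PySem.Dict.contains (PySem.Dict.mk r) "action") = true
instance (templates : List (List (String × String))) (items : List (List (String × String))) (boundary_key : String) : Decidable (Pre_select_contextual_recommendation templates items boundary_key) := by unfold Pre_select_contextual_recommendation; infer_instance

def pvWitness_select_contextual_recommendation : (List (List (String × String))) × (List (List (String × String))) × String :=
  ([[("action", "eat less meat")], [("action", "bike to work")]], [[("type", "Transport")]], "k")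

def Spec_select_contextual_recommendation (templates : List (List (String × String))) (items : List (List (String × String))) (boundary_key : String) (out : List (String × String)) : Prop := out = select_contextual_recommendation_alt templates items boundary_key
instance (templates : List (List (String × String))) (items : List (List (String × String))) (boundary_key : String) (out : List (String × String)) : Decidable (Spec_select_contextual_recommendation templates items boundary_key out) := by unfold Spec_select_contextual_recommendation; infer_instance

-- ===== CLAIM (what is proved, stated in full; the proofs are below) =====
def Claim_equal_select_contextual_recommendation : Prop := ∀ (templates : List (List (String × String))) (items : List (List (String × String))) (boundary_key : String), Dom_select_contextual_recommendation templates items boundary_key → Pre_select_contextual_recommendation templates items boundary_key → Spec_select_contextual_recommendation templates items boundary_key (select_contextual_recommendation templates items boundary_key)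

-- ===== LEMMAS AND PROOFS =====
theorem pv_contains_ofList {xs : List String} {x : String} :
    (PySem.Set.ofList xs).contains x = xs.contains x := by
  simp [PySem.Set.contains_eq_listContains, PySem.Set.mem_ofList]

-- predicate: the template matches keyword group i of pvRules
def pvMatch (kws : List String) (r : List (String × String)) : Bool :=
  kws.any (fun k => PySem.Str.isIn k (pvAction r))

-- one-slot step of the index fold
def pvUpd1 (kws : List String) (r : List (String × String)) (o : Option (List (String × String))) : Option (List (String × String)) :=
  match o with
  | some f => some f
  | none => if kws.any (fun k => PySem.Str.isIn k (pvAction r)) then some r else none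

theorem pv_upd1_orElse (kws : List String) (r : List (String × String))
    (o : Option (List (String × String))) (ts : List (List (String × String))) :
    (pvUpd1 kws r o).orElse (fun _ => ts.find? (pvMatch kws)) =
      o.orElse (fun _ => (r :: ts).find? (pvMatch kws)) := by
  cases o with
  | some f => rfl
  | none =>
    rw [show pvUpd1 kws r none = if pvMatch kws r then some r else none from rfl,
      List.find?_cons]
    cases h : pvMatch kws r <;> simp only [h] <;> rfl

theorem pv_update_triple (r : List (String × String))
    (a b c : Option (List (String × String))) :
    pvUpdate r [a, b, c] =
      [pvUpd1 ["meal", "food", "meat"] r a,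
       pvUpd1 ["clothing", "second-hand"] r b,
       pvUpd1 ["transport", "bike"] r c] := rfl

-- characterisation of B's one-pass index: starting from [a,b,c], each slot ends up
-- as its old value or, if empty, the first template matching its keyword group
theorem pv_fold_index (ts : List (List (String × String)))
    (a b c : Option (List (String × String))) :
    ts.foldl (fun first r => pvUpdate r first) [a, b, c] =
      [a.orElse (fun _ => ts.find? (pvMatch ["meal", "food", "meat"])),
       b.orElse (fun _ => ts.find? (pvMatch ["clothing", "second-hand"])),
       c.orElse (fun _ => ts.find? (pvMatch ["transport", "bike"]))] := by
  induction ts generalizing a b c with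
  | nil => cases a <;> cases b <;> cases c <;> rfl
  | cons r ts ih =>
    rw [List.foldl_cons, pv_update_triple, ih, pv_upd1_orElse, pv_upd1_orElse, pv_upd1_orElse]

theorem pvMatch_def (kws : List String) :
    pvMatch kws = fun r => kws.any (fun k => PySem.Str.isIn k (pvAction r)) := rfl

theorem pv_find_eq_head_filter {α : Type} (p : α → Bool) (l : List α) :
    l.find? p = (l.filter p).head? := List.head?_filter.symm

-- generic combinational bridge between A's getD chain and B's fired/index pick
theorem pv_bridge (c1 c2 c3 : Bool) (o1 o2 o3 : Option (List (String × String))) (d : List (String × String)) :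
    (if c1 then o1 else none).getD ((if c2 then o2 else none).getD ((if c3 then o3 else none).getD d)) =
      (if c1 || (c2 || c3) then (pvPick [(c1, o1), (c2, o2), (c3, o3)]).getD d else d) := by
  cases c1 <;> cases c2 <;> cases c3 <;> cases o1 <;> cases o2 <;> cases o3 <;> rfl

set_option maxHeartbeats 1000000 in
theorem select_contextual_recommendation_spec : Claim_equal_select_contextual_recommendation := by
  intro templates items boundary_key _hDom _hPre
  unfold Spec_select_contextual_recommendation
  unfold select_contextual_recommendation select_contextual_recommendation_alt pvRules
  simp only [List.map_cons, List.map_nil, List.any_cons, List.any_nil, Bool.or_false, id,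
    pv_contains_ofList]
  rw [pv_fold_index]
  simp only [Option.orElse, List.zip_cons_cons, List.zip_nil_right,
    pv_find_eq_head_filter]
  rw [pv_bridge]
  simp only [pvMatch_def, List.any_cons, List.any_nil, Bool.or_false, Bool.or_assoc]
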